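-- pv_equiv track=rewrite | github.com/pybrain/pybrain | pybrain/utilities.py | iterCombinations
-- ===== SOURCE A (Python) =====
-- def iterCombinations(tup):
--     """ all possible of integer tuples of the same dimension than tup, and each component being
--     positive and strictly inferior to the corresponding entry in tup. """
--     if len(tup) == 1:
--         for i in range(tup[0]):
--             yield (i,)
--     elif len(tup) > 1:
--         for prefix in iterCombinations(tup[:-1]):
--             for i in range(tup[-1]):
--                 yield tuple(list(prefix) + [i])
-- ===== SOURCE B (Python) =====
-- def iterCombinations(tup):
--     """ all possible of integer tuples of the same dimension than tup, and each component being
--     positive and strictly inferior to the corresponding entry in tup. """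
--     if not tup:
--         return
--     combos = [(i,) for i in range(tup[0])]
--     for dim in tup[1:]:
--         if not combos:
--             return
--         combos = [c + (i,) for c in combos for i in range(dim)]
--     yield from combos
-- ===== Notes on version B (the rewrite author's own statement) =====
-- stated objective: alternative
-- what changed: Replaces the right-peeling recursion (iterCombinations(tup[:-1]) with an inner range loop) by an iterative odometer that seeds singleton tuples from tup[0] and extends the whole list of partial tuples one dimension at a time left-to-right.
import Mathlib
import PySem

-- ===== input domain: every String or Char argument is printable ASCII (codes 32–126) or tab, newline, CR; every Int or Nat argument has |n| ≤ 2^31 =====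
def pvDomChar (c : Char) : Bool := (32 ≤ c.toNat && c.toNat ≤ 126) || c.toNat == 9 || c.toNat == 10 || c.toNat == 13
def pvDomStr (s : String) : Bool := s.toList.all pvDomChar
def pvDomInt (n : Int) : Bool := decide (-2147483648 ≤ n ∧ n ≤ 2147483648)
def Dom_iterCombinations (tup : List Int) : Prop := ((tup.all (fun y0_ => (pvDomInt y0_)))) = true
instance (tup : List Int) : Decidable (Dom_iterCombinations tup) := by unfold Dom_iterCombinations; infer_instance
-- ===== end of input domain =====

-- B replaces A's right-peeling recursion by an iterative odometer over the dimensions (alternative decomposition, same cost).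


-- ===== PORT A =====
-- literal port: len(tup)==1 branch, then len(tup)>1 branch recursing on tup[:-1] with inner loop over range(tup[-1])
def iterCombinations (tup : List Int) : List (List Int) :=
  if tup.length = 1 then
    (PySem.List.pyRange 0 ((PySem.List.pyGet? tup 0).getD 0) 1).map (fun i => [i])
  else if tup.length > 1 then
    (iterCombinations (PySem.List.slice tup none (some (-1)))).flatMap (fun pre =>
      (PySem.List.pyRange 0 ((PySem.List.pyGet? tup (-1)).getD 0) 1).map (fun i => pre ++ [i]))
  else []
termination_by tup.length
decreasing_by
  simp [PySem.List.slice_to_neg_one, List.length_dropLast]; omega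

-- ===== PORT B =====
-- one odometer step: extend every partial tuple by every value of the new dimension
def odoStep (acc : List (List Int)) (dim : Int) : List (List Int) :=
  acc.flatMap (fun c => (PySem.List.pyRange 0 dim 1).map (fun i => c ++ [i]))

-- the odometer loop over tup[1:], returning early once no partial tuple survives
def odoLoop (combos : List (List Int)) (dims : List Int) : List (List Int) :=
  match dims with
  | [] => combos
  | d :: ds => if combos = [] then [] else odoLoop (odoStep combos d) ds

def iterCombinations_alt (tup : List Int) : List (List Int) :=
  match tup with
  | [] => []
  | x :: rest => odoLoop ((PySem.List.pyRange 0 x 1).map (fun i => [i])) rest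

-- ===== PRECONDITION & SPEC =====
def Spec_iterCombinations (tup : List Int) (out : List (List Int)) : Prop := out = iterCombinations_alt tup
instance (tup : List Int) (out : List (List Int)) : Decidable (Spec_iterCombinations tup out) := by unfold Spec_iterCombinations; infer_instance

-- ===== CLAIM (what is proved, stated in full; the proofs are below) =====
def Claim_equal_iterCombinations : Prop := ∀ (tup : List Int), Dom_iterCombinations tup → Spec_iterCombinations tup (iterCombinations tup)

-- ===== LEMMAS AND PROOFS =====

theorem foldl_odoStep_nil (dims : List Int) : dims.foldl odoStep [] = [] := by
  induction dims with
  | nil => rfl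
  | cons d ds ih => rw [List.foldl_cons]; exact ih

theorem odoLoop_eq_foldl (combos : List (List Int)) (dims : List Int) :
    odoLoop combos dims = dims.foldl odoStep combos := by
  induction dims generalizing combos with
  | nil => rfl
  | cons d ds ih =>
    rw [odoLoop, List.foldl_cons]
    by_cases h : combos = []
    · subst h
      rw [if_pos rfl]
      exact (foldl_odoStep_nil (d :: ds)).symm
    · rw [if_neg h, ih]

theorem iterCombinations_cons (x : Int) (rest : List Int) :
    iterCombinations (x :: rest) = rest.foldl odoStep ((PySem.List.pyRange 0 x 1).map (fun i => [i])) := by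
  induction rest using List.reverseRecOn with
  | nil =>
    simp [iterCombinations]
  | append_singleton ys d ih =>
    rw [show x :: (ys ++ [d]) = (x :: ys) ++ [d] by simp]
    rw [iterCombinations]
    have hlen : ((x :: ys) ++ [d]).length ≠ 1 := by simp
    rw [if_neg hlen, if_pos (by simp)]
    rw [PySem.List.slice_to_neg_one]
    simp only [List.dropLast_concat, PySem.List.pyGet?_neg_one_append_singleton, Option.getD_some,
      List.foldl_append, List.foldl_cons, List.foldl_nil]
    rw [ih]
    rfl

-- ===== VERDICT (by name: the statement is the Claim_ definition above) =====
theorem iterCombinations_spec : Claim_equal_iterCombinations := by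
  intro tup _
  unfold Spec_iterCombinations
  cases tup with
  | nil => rw [iterCombinations]; rfl
  | cons x rest =>
    rw [iterCombinations_cons]
    show _ = odoLoop _ _
    rw [odoLoop_eq_foldl]
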